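-- pv_equiv track=rewrite | github.com/hanrikos/python_to_push | main.py | find_indexes_2
-- ===== SOURCE A (Python) =====
-- def find_indexes_2(target, arr):
--     for i in range(len(arr)):
--         if arr[i] == target:
--             start = i
--             while i+1 < len(arr) and arr[i+1] == target:
--                 i += 1
--             return [start, i]
--     return [-1, -1]
-- ===== SOURCE B (Python) =====
-- def find_indexes_2(target, arr):
--     # group the array into maximal runs of equal values, then scan the runs
--     runs = []
--     for x in arr:
--         if runs and runs[-1][0] == x:
--             runs[-1][1] += 1
--         else:
--             runs.append([x, 1])
--     start = 0
--     for val, n in runs: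
--         if val == target:
--             return [start, start + n - 1]
--         start += n
--     return [-1, -1]
-- ===== Notes on version B (the rewrite author's own statement) =====
-- stated objective: alternative
-- what changed: B first compresses the array into maximal (value, run-length) groups in one pass and then scans the groups with a running start index, replacing A's index scan with an inner while-extension loop.
import Mathlib
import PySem

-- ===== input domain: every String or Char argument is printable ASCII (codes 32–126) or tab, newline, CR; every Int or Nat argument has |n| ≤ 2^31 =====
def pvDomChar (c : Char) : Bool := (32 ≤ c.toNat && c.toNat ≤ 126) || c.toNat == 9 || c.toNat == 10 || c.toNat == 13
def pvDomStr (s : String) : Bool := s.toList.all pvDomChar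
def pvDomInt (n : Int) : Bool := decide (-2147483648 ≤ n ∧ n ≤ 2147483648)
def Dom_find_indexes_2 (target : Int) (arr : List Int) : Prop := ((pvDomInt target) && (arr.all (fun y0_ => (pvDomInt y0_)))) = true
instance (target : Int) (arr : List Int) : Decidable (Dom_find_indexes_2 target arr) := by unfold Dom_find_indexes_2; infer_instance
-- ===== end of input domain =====

-- B groups the array into maximal (value, run-length) runs in one pass and scans the
-- runs with a running start index (alternative decomposition; same O(n) cost as A).

-- ===== PORT A =====
-- the inner `while i+1 < len(arr) and arr[i+1] == target: i += 1`
def fi2_while (target : Int) (arr : List Int) (i : Nat) : Nat :=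
  if h : i + 1 < arr.length then
    if arr[i+1] = target then fi2_while target arr (i+1) else i
  else i
termination_by arr.length - i

-- the `for i in range(len(arr))` loop with its early return
def fi2_for (target : Int) (arr : List Int) (i : Nat) : List Int :=
  if h : i < arr.length then
    if arr[i] = target then [(i : Int), (fi2_while target arr i : Int)]
    else fi2_for target arr (i+1)
  else [-1, -1]
termination_by arr.length - i

def find_indexes_2 (target : Int) (arr : List Int) : List Int :=
  fi2_for target arr 0

-- ===== PORT B =====
-- one step of B's first loop: runs is kept reversed, runs[-1] is the head
def fi2_step (acc : List (Int × Nat)) (x : Int) : List (Int × Nat) :=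
  match acc with
  | (y, n) :: rest => if y = x then (y, n+1) :: rest else (x, 1) :: (y, n) :: rest
  | [] => [(x, 1)]

def fi2_runs (arr : List Int) : List (Int × Nat) :=
  (arr.foldl fi2_step []).reverse

-- B's second loop: scan the runs with a running start index, early return on match
def fi2_scan (target : Int) (start : Int) : List (Int × Nat) → List Int
  | [] => [-1, -1]
  | (v, n) :: rest =>
      if v = target then [start, start + (n : Int) - 1]
      else fi2_scan target (start + (n : Int)) rest

def find_indexes_2_alt (target : Int) (arr : List Int) : List Int :=
  fi2_scan target 0 (fi2_runs arr)

-- ===== PRECONDITION & SPEC =====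
def Spec_find_indexes_2 (target : Int) (arr : List Int) (out : List Int) : Prop := out = find_indexes_2_alt target arr
instance (target : Int) (arr : List Int) (out : List Int) : Decidable (Spec_find_indexes_2 target arr out) := by unfold Spec_find_indexes_2; infer_instance

-- ===== CLAIM (what is proved, stated in full; the proofs are below) =====
def Claim_equal_find_indexes_2 : Prop := ∀ (target : Int) (arr : List Int), Dom_find_indexes_2 target arr → Spec_find_indexes_2 target arr (find_indexes_2 target arr)

-- ===== LEMMAS AND PROOFS =====

-- shift a result (of either program) by one position to the right
def shiftRes : List Int → List Int
  | [a, b] => if a = -1 then [-1, -1] else [a+1, b+1]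
  | r => r

-- prepend a run (y, n) to a run list, merging with the first run if it has key y
def consRun (y : Int) (n : Nat) : List (Int × Nat) → List (Int × Nat)
  | (z, m) :: rest => if z = y then (y, n + m) :: rest else (y, n) :: (z, m) :: rest
  | [] => [(y, n)]

-- structural (back-to-front) runs
def R : List Int → List (Int × Nat)
  | [] => []
  | x :: xs => consRun x 1 (R xs)

-- common specification of both programs
def fiS (t : Int) : List Int → List Int
  | [] => [-1, -1]
  | x :: xs =>
      if x = t then [0, ((xs.takeWhile (· = t)).length : Int)]
      else shiftRes (fiS t xs)

theorem consRun_ne_nil (y : Int) (n : Nat) (rs : List (Int × Nat)) :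
    consRun y n rs ≠ [] := by
  cases rs with
  | nil => simp [consRun]
  | cons p t => obtain ⟨z, m⟩ := p; simp only [consRun]; split <;> simp

theorem consRun_head (y : Int) (n : Nat) (rs : List (Int × Nat)) :
    ∃ m t, consRun y n rs = (y, m) :: t := by
  cases rs with
  | nil => exact ⟨n, [], rfl⟩
  | cons p t =>
    obtain ⟨z, m⟩ := p
    simp only [consRun]
    split
    · exact ⟨n + m, t, rfl⟩
    · exact ⟨n, (z, m) :: t, rfl⟩

theorem consRun_consRun (y : Int) (n m : Nat) (rs : List (Int × Nat)) :
    consRun y n (consRun y m rs) = consRun y (n + m) rs := by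
  cases rs with
  | nil => simp [consRun]
  | cons p t =>
    obtain ⟨z, k⟩ := p
    by_cases hz : z = y
    · subst hz; simp [consRun, Nat.add_assoc]
    · simp [consRun, hz]

theorem R_nil_iff (xs : List Int) : R xs = [] ↔ xs = [] := by
  cases xs with
  | nil => simp [R]
  | cons x t => simpa [R] using consRun_ne_nil x 1 (R t)

theorem foldl_step (t : List Int) :
    ∀ (y : Int) (n : Nat) (rest : List (Int × Nat)),
      (t.foldl fi2_step ((y, n) :: rest)).reverse = rest.reverse ++ consRun y n (R t) := by
  induction t with
  | nil => intro y n rest; simp [R, consRun]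
  | cons x xs ih =>
    intro y n rest
    simp only [List.foldl_cons, fi2_step]
    by_cases h : y = x
    · subst h
      rw [if_pos rfl, ih]
      simp [R, consRun_consRun, Nat.add_comm]
    · rw [if_neg h, ih]
      have hxy : ¬ x = y := fun hc => h hc.symm
      obtain ⟨m', t', ht⟩ := consRun_head x 1 (R xs)
      simp only [R]
      rw [ht]
      simp [consRun, hxy, List.append_assoc]

theorem runs_eq_R (arr : List Int) : fi2_runs arr = R arr := by
  cases arr with
  | nil => rfl
  | cons x xs =>
    show ((x :: xs).foldl fi2_step []).reverse = R (x :: xs)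
    rw [List.foldl_cons]
    show (xs.foldl fi2_step ((x, 1) :: [])).reverse = R (x :: xs)
    rw [foldl_step]
    simp [R]

theorem R_head (xs : List Int) :
    ∀ (y : Int) (m : Nat) (rest : List (Int × Nat)), R xs = (y, m) :: rest →
      xs.head? = some y ∧ (xs.takeWhile (· = y)).length = m := by
  induction xs with
  | nil => intro y m rest h; simp [R] at h
  | cons x t ih =>
    intro y m rest h
    simp only [R] at h
    rcases ht : R t with _ | ⟨⟨z, k⟩, t'⟩ <;> rw [ht] at h
    · simp only [consRun, List.cons.injEq, Prod.mk.injEq] at h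
      obtain ⟨⟨h1, h2⟩, h3⟩ := h
      subst h1
      have : t = [] := (R_nil_iff t).mp ht
      subst this
      exact ⟨rfl, by simpa using h2⟩
    · simp only [consRun] at h
      by_cases hzx : z = x
      · rw [if_pos hzx] at h
        subst hzx
        simp only [List.cons.injEq, Prod.mk.injEq] at h
        obtain ⟨⟨h1, h2⟩, h3⟩ := h
        subst h1
        obtain ⟨hhd, hlen⟩ := ih _ _ _ ht
        refine ⟨rfl, ?_⟩
        simp only [List.takeWhile_cons, decide_true, if_pos rfl]
        simp [hlen]
        omega
      · rw [if_neg hzx] at h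
        simp only [List.cons.injEq, Prod.mk.injEq] at h
        obtain ⟨⟨h1, h2⟩, h3⟩ := h
        subst h1
        obtain ⟨hhd, -⟩ := ih z k t' ht
        have httw : t.takeWhile (· = x) = [] := by
          cases t with
          | nil => rfl
          | cons a b =>
            have : a = z := by injection hhd
            subst this
            simp [List.takeWhile_cons, hzx]
        refine ⟨rfl, ?_⟩
        simp [List.takeWhile_cons, httw, ← h2]

theorem scan_shift (t : Int) (rs : List (Int × Nat)) :
    ∀ (s : Int), 0 ≤ s → fi2_scan t (s + 1) rs = shiftRes (fi2_scan t s rs) := by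
  induction rs with
  | nil => intro s hs; simp [fi2_scan, shiftRes]
  | cons p rest ih =>
    intro s hs
    obtain ⟨v, n⟩ := p
    simp only [fi2_scan]
    split
    · have : s ≠ -1 := by omega
      simp [shiftRes, this]
      omega
    · have h1 : s + 1 + (n : Int) = (s + n) + 1 := by ring
      rw [h1, ih (s + n) (by positivity)]

theorem alt_eq_S (t : Int) (arr : List Int) :
    find_indexes_2_alt t arr = fiS t arr := by
  induction arr with
  | nil => rfl
  | cons x xs ih =>
    show fi2_scan t 0 (fi2_runs (x :: xs)) = fiS t (x :: xs)
    rw [runs_eq_R]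
    have ihR : fi2_scan t 0 (R xs) = fiS t xs := by
      rw [← runs_eq_R]; exact ih
    rcases hR : R xs with _ | ⟨⟨y, m⟩, rest⟩
    · have hxs : xs = [] := (R_nil_iff xs).mp hR
      subst hxs
      by_cases hx : x = t
      · simp [R, consRun, fi2_scan, fiS, hx]
      · simp [R, consRun, fi2_scan, fiS, hx, shiftRes]
    · obtain ⟨hhd, hlen⟩ := R_head xs y m rest hR
      rw [hR] at ihR
      simp only [R, hR]
      by_cases hyx : y = x
      · subst hyx
        have hc : consRun y 1 ((y, m) :: rest) = (y, 1 + m) :: rest := by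
          simp [consRun]
        rw [hc]
        by_cases hx : y = t
        · subst hx
          simp [fi2_scan, fiS, hlen]
          try omega
        · have h1 : fi2_scan t 0 ((y, 1 + m) :: rest) =
              fi2_scan t (0 + ((1 + m : Nat) : Int)) rest := by
            simp [fi2_scan, hx]
          have h2 : fi2_scan t 0 ((y, m) :: rest) =
              fi2_scan t (0 + (m : Int)) rest := by
            simp [fi2_scan, hx]
          rw [h1, show (0 : Int) + ((1 + m : Nat) : Int) = ((0 : Int) + m) + 1 by
            push_cast; ring,
            scan_shift t rest (0 + m) (by positivity), ← h2, ihR]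
          simp [fiS, hx]
      · have hc : consRun x 1 ((y, m) :: rest) = (x, 1) :: (y, m) :: rest := by
          simp [consRun, hyx]
        rw [hc]
        by_cases hx : x = t
        · subst hx
          have hyt : y ≠ x := hyx
          have httw : xs.takeWhile (· = x) = [] := by
            cases xs with
            | nil => rfl
            | cons a b =>
              have : a = y := by injection hhd
              subst this
              simp [List.takeWhile_cons, hyt]
          simp [fi2_scan, fiS, httw]
        · have h1 : fi2_scan t 0 ((x, 1) :: (y, m) :: rest) =
              fi2_scan t (0 + ((1 : Nat) : Int)) ((y, m) :: rest) := by
            simp [fi2_scan, hx]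
          rw [h1, show (0 : Int) + ((1 : Nat) : Int) = (0 : Int) + 1 by norm_num,
            scan_shift t ((y, m) :: rest) 0 le_rfl, ihR]
          simp [fiS, hx]

theorem while_spec (t : Int) (arr : List Int) :
    ∀ i, fi2_while t arr i = i + ((arr.drop (i+1)).takeWhile (· = t)).length := by
  intro i
  fun_induction fi2_while t arr i with
  | case1 i h heq ih =>
    rw [ih]
    rw [List.drop_eq_getElem_cons h]
    simp [List.takeWhile, heq]
    omega
  | case2 i h heq =>
    rw [List.drop_eq_getElem_cons h]
    simp [List.takeWhile, heq]
  | case3 i h =>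
    rw [List.drop_eq_nil_iff.mpr (by omega)]
    simp

theorem for_shift (t : Int) (x : Int) (xs : List Int) :
    ∀ i, fi2_for t (x :: xs) (i + 1) = shiftRes (fi2_for t xs i) := by
  intro i
  fun_induction fi2_for t xs i with
  | case1 i h heq =>
    have h' : i + 1 < (x :: xs).length := by simp; omega
    rw [fi2_for, dif_pos h']
    have hget : (x :: xs)[i+1]'h' = xs[i]'h := by simp
    rw [if_pos (by rw [hget]; exact heq)]
    have hA : fi2_while t (x :: xs) (i + 1) = fi2_while t xs i + 1 := by
      rw [while_spec, while_spec]
      simp only [List.drop_succ_cons]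
      omega
    have : ((i : Int)) ≠ -1 := by omega
    simp [shiftRes, this, hA]
  | case2 i h heq ih =>
    have h' : i + 1 < (x :: xs).length := by simp; omega
    rw [fi2_for, dif_pos h']
    have hget : (x :: xs)[i+1]'h' = xs[i]'h := by simp
    rw [if_neg (by rw [hget]; exact heq)]
    exact ih
  | case3 i h =>
    have h' : ¬ (i + 1 < (x :: xs).length) := by simp; omega
    rw [fi2_for, dif_neg h']
    simp [shiftRes]

theorem for_eq_S (t : Int) (arr : List Int) :
    fi2_for t arr 0 = fiS t arr := by
  induction arr with
  | nil => simp [fi2_for, fiS]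
  | cons x xs ih =>
    have h0 : 0 < (x :: xs).length := by simp
    rw [fi2_for, dif_pos h0]
    by_cases hx : x = t
    · subst hx
      rw [if_pos (by simp)]
      have hw : fi2_while x (x :: xs) 0 = (xs.takeWhile (· = x)).length := by
        rw [while_spec]; simp
      simp [fiS, hw]
    · rw [if_neg (by simpa using hx)]
      show fi2_for t (x :: xs) (0 + 1) = fiS t (x :: xs)
      rw [for_shift, ih]
      simp [fiS, hx]

-- ===== VERDICT (by name: the statement is the Claim_ definition above) =====
theorem find_indexes_2_spec : Claim_equal_find_indexes_2 := by
  intro target arr _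
  show find_indexes_2 target arr = find_indexes_2_alt target arr
  rw [show find_indexes_2 target arr = fi2_for target arr 0 from rfl,
    for_eq_S, ← alt_eq_S]
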